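-- pv_equiv track=rewrite | github.com/chengez/Tool-Cognition-Action | position_spec.py | find_pattern_token_indices
-- ===== SOURCE A (Python) =====
-- from typing import Union, List
--
-- def find_pattern_token_indices(
--     query_token_ids: List[int],
--     pattern_token_ids: List[int],
-- ) -> List[int]:
--     """
--     Find the starting indices of all occurrences of a pattern in tokenized query.
--
--     Args:
--         query_token_ids: Tokenized query as list of ints
--         pattern_token_ids: Tokenized pattern as list of ints
--
--     Returns:
--         List of starting indices where the pattern occurs
--     """
--     pattern_len = len(pattern_token_ids)
--     occurrences = []
--
--     for i in range(len(query_token_ids) - pattern_len + 1):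
--         if query_token_ids[i:i + pattern_len] == pattern_token_ids:
--             occurrences.append(i)
--
--     return occurrences
-- ===== SOURCE B (Python) =====
-- from typing import List
--
--
-- def find_pattern_token_indices(
--     query_token_ids: List[int],
--     pattern_token_ids: List[int],
-- ) -> List[int]:
--     """Rabin-Karp: a rolling hash filters candidate positions in one pass;
--     the full comparison runs only on hash hits."""
--     n = len(query_token_ids)
--     m = len(pattern_token_ids)
--     if m == 0:
--         return list(range(n + 1))
--     if m > n:
--         return []
--     BASE = 1000003
--     MOD = 2305843009213693951  # 2**61 - 1
--     hp = 0
--     for t in pattern_token_ids: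
--         hp = (hp * BASE + t) % MOD
--     h = 0
--     for t in query_token_ids[:m]:
--         h = (h * BASE + t) % MOD
--     top = pow(BASE, m - 1, MOD)
--     occurrences = []
--     for i in range(n - m + 1):
--         if h == hp and query_token_ids[i:i + m] == pattern_token_ids:
--             occurrences.append(i)
--         if i + m < n:
--             h = ((h - query_token_ids[i] * top) * BASE + query_token_ids[i + m]) % MOD
--     return occurrences
-- ===== Notes on version B (the rewrite author's own statement) =====
-- stated objective: alternative
-- what changed: Replaced the per-position slice-and-compare scan with Rabin-Karp matching: a rolling window hash is maintained across positions and the exact slice comparison runs only on hash hits.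
import Mathlib
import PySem

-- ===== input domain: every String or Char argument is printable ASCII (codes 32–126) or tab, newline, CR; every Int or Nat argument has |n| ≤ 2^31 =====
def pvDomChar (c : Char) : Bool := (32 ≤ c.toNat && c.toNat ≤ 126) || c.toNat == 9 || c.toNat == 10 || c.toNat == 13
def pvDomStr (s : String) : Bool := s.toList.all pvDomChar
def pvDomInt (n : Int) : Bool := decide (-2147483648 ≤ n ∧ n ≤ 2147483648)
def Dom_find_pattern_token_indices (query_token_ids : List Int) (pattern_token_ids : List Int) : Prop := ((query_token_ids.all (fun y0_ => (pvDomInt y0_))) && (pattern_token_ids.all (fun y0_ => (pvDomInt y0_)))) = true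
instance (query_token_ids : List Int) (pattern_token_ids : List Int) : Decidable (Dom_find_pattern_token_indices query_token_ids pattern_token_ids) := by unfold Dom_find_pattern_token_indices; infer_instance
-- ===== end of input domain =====

-- B is an alternative algorithm: Rabin-Karp matching — a rolling window hash is
-- maintained across positions and the exact slice comparison runs only on hash hits.
-- ===== PORT A =====
def find_pattern_token_indices (query_token_ids : List Int) (pattern_token_ids : List Int) : List Int :=
  let pattern_len : Int := pattern_token_ids.length
  (PySem.List.pyRange 0 ((query_token_ids.length : Int) - pattern_len + 1) 1).foldl
    (fun occurrences i =>
      if PySem.List.slice query_token_ids (some i) (some (i + pattern_len)) = pattern_token_ids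
      then occurrences ++ [i] else occurrences) []


-- ===== PORT B =====
-- B-side helpers: rolling-hash constants and the hash fold (mod is Python's %)
def rkB : Int := 1000003
def rkM : Int := 2305843009213693951
def rkHash (l : List Int) : Int := l.foldl (fun h t => PySem.Int.mod (h * rkB + t) rkM) 0

def find_pattern_token_indices_alt (query_token_ids : List Int) (pattern_token_ids : List Int) : List Int :=
  let n := query_token_ids.length
  let m := pattern_token_ids.length
  if m = 0 then PySem.List.pyRange 0 ((n : Int) + 1) 1
  else if n < m then []
  else
    let hp := rkHash pattern_token_ids
    let h0 := rkHash (PySem.List.slice query_token_ids (some 0) (some (m : Int)))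
    let top := PySem.Int.powMod rkB (m - 1) rkM
    ((PySem.List.pyRange 0 ((n : Int) - (m : Int) + 1) 1).foldl
      (fun st i =>
        let occurrences :=
          if st.1 = hp ∧ PySem.List.slice query_token_ids (some i) (some (i + (m : Int))) = pattern_token_ids
          then st.2 ++ [i] else st.2
        let h' :=
          if i + (m : Int) < (n : Int) then
            PySem.Int.mod ((st.1 - PySem.List.pyGetD query_token_ids i 0 * top) * rkB
              + PySem.List.pyGetD query_token_ids (i + (m : Int)) 0) rkM
          else st.1
        (h', occurrences))
      (h0, [])).2


-- ===== PRECONDITION & SPEC =====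
def Spec_find_pattern_token_indices (query_token_ids : List Int) (pattern_token_ids : List Int) (out : List Int) : Prop := out = find_pattern_token_indices_alt query_token_ids pattern_token_ids
instance (query_token_ids : List Int) (pattern_token_ids : List Int) (out : List Int) : Decidable (Spec_find_pattern_token_indices query_token_ids pattern_token_ids out) := by unfold Spec_find_pattern_token_indices; infer_instance

-- ===== CLAIM (what is proved, stated in full; the proofs are below) =====
def Claim_equal_find_pattern_token_indices : Prop := ∀ (query_token_ids : List Int) (pattern_token_ids : List Int), Dom_find_pattern_token_indices query_token_ids pattern_token_ids → Spec_find_pattern_token_indices query_token_ids pattern_token_ids (find_pattern_token_indices query_token_ids pattern_token_ids)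

-- ===== LEMMAS AND PROOFS =====

def polyVal (l : List Int) : Int := l.foldl (fun h t => h * rkB + t) 0

lemma rkM_pos : (0 : Int) < rkM := by decide

lemma poly_foldl_acc (l : List Int) : ∀ (a : Int),
    l.foldl (fun h t => h * rkB + t) a = a * rkB ^ l.length + polyVal l := by
  induction l with
  | nil => intro a; simp [polyVal]
  | cons x l ih =>
    intro a
    simp only [List.foldl_cons, List.length_cons, polyVal] at *
    rw [ih (a * rkB + x), show (0 : Int) * rkB + x = x by ring, ih x]
    ring

lemma polyVal_cons (x : Int) (l : List Int) :
    polyVal (x :: l) = x * rkB ^ l.length + polyVal l := by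
  have := poly_foldl_acc l x
  simpa [polyVal] using this

lemma polyVal_append_singleton (l : List Int) (b : Int) :
    polyVal (l ++ [b]) = polyVal l * rkB + b := by
  simp [polyVal, List.foldl_append]

lemma rkHash_eq_poly_mod_gen (l : List Int) : ∀ (a a' : Int), a = a' % rkM →
    l.foldl (fun h t => PySem.Int.mod (h * rkB + t) rkM) a = (l.foldl (fun h t => h * rkB + t) a') % rkM := by
  induction l with
  | nil => intro a a' h; simpa using h
  | cons x l ih =>
    intro a a' h
    simp only [List.foldl_cons]
    apply ih
    rw [PySem.Int.mod_eq_emod_of_pos rkM_pos, h]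
    have h1 : (a' % rkM) % rkM = a' % rkM := Int.emod_emod_of_dvd a' dvd_rfl
    exact ((Int.ModEq.mul_right rkB h1).add_right x)

lemma rkHash_eq_poly_mod (l : List Int) : rkHash l = polyVal l % rkM := by
  exact rkHash_eq_poly_mod_gen l 0 0 (by decide)

lemma rk_roll (a b : Int) (ws : List Int) :
    PySem.Int.mod ((rkHash (a :: ws) - a * PySem.Int.powMod rkB ws.length rkM) * rkB + b) rkM
      = rkHash (ws ++ [b]) := by
  rw [PySem.Int.mod_eq_emod_of_pos rkM_pos, PySem.Int.powMod_eq,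
      PySem.Int.mod_eq_emod_of_pos rkM_pos,
      rkHash_eq_poly_mod (a :: ws), rkHash_eq_poly_mod (ws ++ [b]),
      polyVal_append_singleton, polyVal_cons]
  have h1 : Int.ModEq rkM ((a * rkB ^ ws.length + polyVal ws) % rkM) (a * rkB ^ ws.length + polyVal ws) :=
    Int.emod_emod_of_dvd _ dvd_rfl
  have h2 : Int.ModEq rkM (rkB ^ ws.length % rkM) (rkB ^ ws.length) :=
    Int.emod_emod_of_dvd _ dvd_rfl
  have h3 : Int.ModEq rkM
      (((a * rkB ^ ws.length + polyVal ws) % rkM - a * (rkB ^ ws.length % rkM)) * rkB + b)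
      (((a * rkB ^ ws.length + polyVal ws) - a * rkB ^ ws.length) * rkB + b) :=
    ((h1.sub (h2.mul_left a)).mul_right rkB).add_right b
  have h4 : ((a * rkB ^ ws.length + polyVal ws) - a * rkB ^ ws.length) * rkB + b
      = polyVal ws * rkB + b := by ring
  rw [h4] at h3
  exact h3


-- ===== VERDICT (by name: the statement is the Claim_ definition above) =====
lemma windows (q : List Int) (m j : Nat) (hm : 1 ≤ m) (hfull : j + m < q.length) :
    (q.drop j).take m = q[j]'(by omega) :: (q.drop (j+1)).take (m-1) ∧
    (q.drop (j+1)).take m = (q.drop (j+1)).take (m-1) ++ [q[j+m]'(by omega)] := by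
  obtain ⟨k, rfl⟩ : ∃ k, m = k + 1 := ⟨m - 1, by omega⟩
  constructor
  · rw [List.drop_eq_getElem_cons (show j < q.length by omega), List.take_succ_cons,
        Nat.add_sub_cancel]
  · rw [Nat.add_sub_cancel, List.take_add_one, List.getElem?_drop,
        List.getElem?_eq_getElem (show j + 1 + k < q.length by omega)]
    simp [show j + 1 + k = j + (k + 1) by omega]

lemma roll_step (q : List Int) (m j : Nat) (hm : 1 ≤ m) (hfull : j + m < q.length) :
    PySem.Int.mod ((rkHash ((q.drop j).take m) - q.getD j 0 * PySem.Int.powMod rkB (m-1) rkM) * rkB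
        + q.getD (j+m) 0) rkM
      = rkHash ((q.drop (j+1)).take m) := by
  obtain ⟨h1, h2⟩ := windows q m j hm hfull
  have hlen : ((q.drop (j+1)).take (m-1)).length = m - 1 := by
    simp only [List.length_take, List.length_drop]
    omega
  have hroll := rk_roll (q[j]'(by omega)) (q[j+m]'(by omega)) ((q.drop (j+1)).take (m-1))
  rw [hlen] at hroll
  rw [List.getD_eq_getElem q 0 (show j < q.length by omega),
      List.getD_eq_getElem q 0 (show j + m < q.length from hfull), h1, h2]
  exact hroll

-- the two loop bodies, named for the induction (identical to the lambdas in the ports)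
def aStep (q p : List Int) : List Int → Int → List Int := fun occurrences i =>
  if PySem.List.slice q (some i) (some (i + (p.length : Int))) = p
  then occurrences ++ [i] else occurrences

def bStep (q p : List Int) (hp top : Int) : Int × List Int → Int → Int × List Int := fun st i =>
  let occurrences :=
    if st.1 = hp ∧ PySem.List.slice q (some i) (some (i + (p.length : Int))) = p
    then st.2 ++ [i] else st.2
  let h' :=
    if i + (p.length : Int) < (q.length : Int) then
      PySem.Int.mod ((st.1 - PySem.List.pyGetD q i 0 * top) * rkB
        + PySem.List.pyGetD q (i + (p.length : Int)) 0) rkM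
    else st.1
  (h', occurrences)

lemma loop_eq (q p : List Int) (hm : 1 ≤ p.length) :
    ∀ (k j : Nat) (h : Int) (occ : List Int),
      (j : Int) + k = (q.length : Int) - p.length + 1 →
      h = rkHash ((q.drop j).take p.length) →
      ((PySem.List.pyRange (j : Int) ((q.length : Int) - p.length + 1) 1).foldl
          (bStep q p (rkHash p) (PySem.Int.powMod rkB (p.length - 1) rkM)) (h, occ)).2
        = (PySem.List.pyRange (j : Int) ((q.length : Int) - p.length + 1) 1).foldl (aStep q p) occ := by
  intro k
  induction k with
  | zero =>
    intro j h occ hje _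
    rw [PySem.List.pyRange_one_eq_nil (by omega)]
    rfl
  | succ k ih =>
    intro j h occ hje hh
    have hje' : (j : Int) + ((k : Int) + 1) = (q.length : Int) - p.length + 1 := by push_cast at hje; omega
    have hjlt : (j : Int) < (q.length : Int) - p.length + 1 := by omega
    rw [PySem.List.pyRange_one_cons hjlt, List.foldl_cons, List.foldl_cons]
    have hslice : PySem.List.slice q (some (j : Int)) (some ((j : Int) + (p.length : Int)))
        = (q.drop j).take p.length := PySem.List.slice_natCast_add q j p.length
    set top := PySem.Int.powMod rkB (p.length - 1) rkM with htop
    have hocc : (bStep q p (rkHash p) top (h, occ) (j : Int)).2 = aStep q p occ (j : Int) := by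
      show (if h = rkHash p ∧
              PySem.List.slice q (some (j : Int)) (some ((j : Int) + (p.length : Int))) = p
            then occ ++ [(j : Int)] else occ) = _
      by_cases hw : PySem.List.slice q (some (j : Int)) (some ((j : Int) + (p.length : Int))) = p
      · have hhp : h = rkHash p := by
          rw [hslice] at hw
          rw [hh, hw]
        simp [aStep, hw, hhp]
      · simp [aStep, hw]
    rcases Nat.eq_zero_or_pos k with hk0 | hkpos
    · subst hk0
      rw [PySem.List.pyRange_one_eq_nil (by omega : (q.length : Int) - p.length + 1 ≤ (j : Int) + 1)]
      simpa using hocc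
    · -- at least one more iteration: the window at j+1 is full and the rolled hash is its hash
      have hfull : j + p.length < q.length := by
        have := hje'
        push_cast at this ⊢
        omega
      have hguard : (j : Int) + (p.length : Int) < (q.length : Int) := by omega
      have hcast : (j : Int) + (p.length : Int) = ((j + p.length : Nat) : Int) := by push_cast; ring
      have hh' : (bStep q p (rkHash p) top (h, occ) (j : Int)).1
          = rkHash ((q.drop (j + 1)).take p.length) := by
        show (if (j : Int) + (p.length : Int) < (q.length : Int) then
                PySem.Int.mod ((h - PySem.List.pyGetD q (j : Int) 0 * top) * rkB
                  + PySem.List.pyGetD q ((j : Int) + (p.length : Int)) 0) rkM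
              else h) = _
        rw [if_pos hguard, hcast, PySem.List.pyGetD_natCast, PySem.List.pyGetD_natCast, hh, htop]
        exact roll_step q p.length j hm hfull
      have hrec := ih (j + 1)
        ((bStep q p (rkHash p) top (h, occ) (j : Int)).1)
        ((bStep q p (rkHash p) top (h, occ) (j : Int)).2)
        (by push_cast; omega) hh'
      push_cast at hrec
      rw [hocc] at hrec
      have hsplit : bStep q p (rkHash p) top (h, occ) (j : Int)
          = ((bStep q p (rkHash p) top (h, occ) (j : Int)).1, aStep q p occ (j : Int)) := by
        rw [← hocc]
      rw [hsplit]
      exact hrec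

theorem find_pattern_token_indices_spec : Claim_equal_find_pattern_token_indices := by
  intro q p _
  unfold Spec_find_pattern_token_indices
  simp only [find_pattern_token_indices, find_pattern_token_indices_alt]
  by_cases hm0 : p.length = 0
  · -- empty pattern: every position 0..n matches
    rw [if_pos hm0]
    obtain rfl : p = [] := List.length_eq_zero_iff.mp hm0
    simp only [List.length_nil, Nat.cast_zero, add_zero, Int.sub_zero]
    rw [PySem.List.foldl_append_ite_eq_filter
      (fun i => PySem.List.slice q (some i) (some i) = ([] : List Int))]
    rw [List.nil_append, List.filter_eq_self.mpr]
    intro i hi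
    have h0i : (0 : Int) ≤ i := (PySem.List.mem_pyRange_one.mp hi).1
    simp [PySem.List.slice_toNat q h0i h0i]
  · by_cases hnm : q.length < p.length
    · -- pattern longer than query: empty range on both sides
      rw [if_neg hm0, if_pos hnm,
          PySem.List.pyRange_one_eq_nil (by omega : (q.length : Int) - p.length + 1 ≤ 0)]
      rfl
    · rw [if_neg hm0, if_neg hnm]
      have hm : 1 ≤ p.length := by omega
      have hh0 : rkHash (PySem.List.slice q (some 0) (some (p.length : Int)))
          = rkHash ((q.drop 0).take p.length) := by
        rw [PySem.List.slice_zero_start, PySem.List.slice_to_natCast, List.drop_zero]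
      exact (loop_eq q p hm (q.length - p.length + 1) 0
        (rkHash (PySem.List.slice q (some 0) (some (p.length : Int)))) []
        (by push_cast; omega) hh0).symm
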